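-- pv_equiv track=rewrite | github.com/Whitfield-Group-QC/Inverse-Maps | inv-maps-master/graph_generators/sierpinski.py | sierpinski_positions
-- ===== SOURCE A (Python) =====
-- def sierpinski_positions(depth=None, N=None):
--     if N is not None:
--         depth = 0
--         while pow(3, depth) < N:
--             depth += 1
--
--     t = 1
--     pos = {0: (0,0), 1: (1,2), 2:(2, 0)}
--
--     while t < depth:
--         addition = pow(3, t)
--         second_pos, third_pos = {}, {}
--         for node, position in pos.items():
--             second_pos[node + addition] = (position[0]+pow(2,t), position[1]+pow(2,t+1) - 1)
--             third_pos[node+2*addition] = (position[0] + pow(2, t+1), position[1])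
--
--         pos.update(second_pos)
--         pos.update(third_pos)
--         t += 1
--
--     return pos
-- ===== SOURCE B (Python) =====
-- def sierpinski_positions(depth=None, N=None):
--     if N is not None:
--         depth = 0
--         while pow(3, depth) < N:
--             depth += 1
--
--     size = 3 if depth <= 1 else pow(3, depth)
--     pos = {}
--     for n in range(size):
--         c = n % 3
--         if c == 1:
--             x, y = 1, 2
--         elif c == 2:
--             x, y = 2, 0
--         else:
--             x, y = 0, 0
--         m, t = n // 3, 1
--         while m > 0:
--             c = m % 3
--             if c == 1:
--                 x += pow(2, t)
--                 y += pow(2, t + 1) - 1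
--             elif c == 2:
--                 x += pow(2, t + 1)
--             m //= 3
--             t += 1
--         pos[n] = (x, y)
--     return pos
-- ===== Notes on version B (the rewrite author's own statement) =====
-- stated objective: alternative
-- what changed: A's level-by-level loop that doubles a growing dict with two shifted copies per round is replaced by a closed form per node id: each node n's position is computed directly from n's base-3 digits (digit t selects the copy offset at level t), iterating n over range(3**depth).
-- outside the precondition, e.g. on sierpinski_positions(None, None): A raises TypeError, B raises TypeError
import Mathlib
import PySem

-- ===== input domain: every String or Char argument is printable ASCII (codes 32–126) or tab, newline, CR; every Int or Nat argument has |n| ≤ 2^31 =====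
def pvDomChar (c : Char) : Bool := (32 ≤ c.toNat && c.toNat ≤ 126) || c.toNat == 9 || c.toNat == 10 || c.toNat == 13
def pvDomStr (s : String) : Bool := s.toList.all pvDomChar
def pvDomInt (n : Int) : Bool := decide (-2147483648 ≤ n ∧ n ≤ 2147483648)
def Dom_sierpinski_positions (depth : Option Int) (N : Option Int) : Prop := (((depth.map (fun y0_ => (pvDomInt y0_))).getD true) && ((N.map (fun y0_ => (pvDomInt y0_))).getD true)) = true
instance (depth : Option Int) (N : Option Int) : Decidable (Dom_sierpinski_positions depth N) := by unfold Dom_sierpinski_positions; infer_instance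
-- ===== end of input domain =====

-- B replaces A's level-by-level dict-doubling loop by a closed form per node id:
-- node n's position is read off n's base-3 digits (objective: alternative).

-- ===== PORT A =====
-- 'while pow(3, depth) < N: depth += 1' (terminates since 3^d grows without bound)
def aDepthLoop (n : Int) (d : Nat) : Int :=
  if 3 ^ d < n then aDepthLoop n (d + 1) else (d : Int)
termination_by (n - 3 ^ d).toNat
decreasing_by
  have h1 : (0:Int) < 3 ^ d := pow_pos (by norm_num) d
  omega

-- the main while-loop; the per-round dicts second_pos/third_pos receive only fresh keys,
-- so dict.update is exactly list append in insertion order (pairs flattened to triples)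
def aLoop (d : Int) (t : Nat) (pos : List (Int × Int × Int)) : List (Int × Int × Int) :=
  if (t : Int) < d then
    aLoop d (t + 1)
      (pos ++ pos.map (fun p => (p.1 + 3 ^ t, p.2.1 + 2 ^ t, p.2.2 + 2 ^ (t + 1) - 1))
           ++ pos.map (fun p => (p.1 + 2 * 3 ^ t, p.2.1 + 2 ^ (t + 1), p.2.2)))
  else pos
termination_by (d - t).toNat
decreasing_by omega

def sierpinski_positions (depth : Option Int) (N : Option Int) : List (Int × Int × Int) :=
  let d : Int :=
    match N with
    | some n => aDepthLoop n 0
    | none => depth.getD 0   -- depth = none here raises TypeError in Python: excluded by Pre_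
  aLoop d 1 [(0, 0, 0), (1, 1, 2), (2, 2, 0)]

-- ===== PORT B =====
-- same N-to-depth guard as A (kept unchanged in Source B)
def bDepthLoop (n : Int) (d : Nat) : Int :=
  if 3 ^ d < n then bDepthLoop n (d + 1) else (d : Int)
termination_by (n - 3 ^ d).toNat
decreasing_by
  have h1 : (0:Int) < 3 ^ d := pow_pos (by norm_num) d
  omega

-- 'while m > 0: c = m % 3; …; m //= 3; t += 1'
def bDigitLoop (m : Int) (t : Nat) (x : Int) (y : Int) : Int × Int :=
  if 0 < m then
    if PySem.Int.mod m 3 = 1 then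
      bDigitLoop (PySem.Int.floordiv m 3) (t + 1) (x + 2 ^ t) (y + 2 ^ (t + 1) - 1)
    else if PySem.Int.mod m 3 = 2 then
      bDigitLoop (PySem.Int.floordiv m 3) (t + 1) (x + 2 ^ (t + 1)) y
    else
      bDigitLoop (PySem.Int.floordiv m 3) (t + 1) x y
  else (x, y)
termination_by m.toNat
decreasing_by
  all_goals
    rename_i hm _
    rw [PySem.Int.floordiv_eq_ediv_of_pos (by norm_num : (0:Int) < 3)]
    omega

-- the loop body of 'for n in range(size)'
def bNode (n : Int) : Int × Int × Int :=
  let c := PySem.Int.mod n 3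
  let base : Int × Int := if c = 1 then (1, 2) else if c = 2 then (2, 0) else (0, 0)
  let p := bDigitLoop (PySem.Int.floordiv n 3) 1 base.1 base.2
  (n, p.1, p.2)

def sierpinski_positions_alt (depth : Option Int) (N : Option Int) : List (Int × Int × Int) :=
  let d : Int :=
    match N with
    | some n => bDepthLoop n 0
    | none => depth.getD 0   -- depth = none here raises TypeError in Python: excluded by Pre_
  let size : Int := if d ≤ 1 then 3 else 3 ^ d.toNat
  (PySem.List.pyRange 0 size 1).map bNode

-- ===== PRECONDITION & SPEC =====
-- Pre_ excludes only (None, None), on which Python A (and B) raise TypeError ('<' with NoneType).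
def Pre_sierpinski_positions (depth : Option Int) (N : Option Int) : Prop :=
  depth.isSome ∨ N.isSome
instance (depth : Option Int) (N : Option Int) : Decidable (Pre_sierpinski_positions depth N) := by
  unfold Pre_sierpinski_positions; infer_instance

def pvWitness_sierpinski_positions : Option Int × Option Int := (some 3, none)

def Spec_sierpinski_positions (depth : Option Int) (N : Option Int) (out : List (Int × Int × Int)) : Prop := out = sierpinski_positions_alt depth N
instance (depth : Option Int) (N : Option Int) (out : List (Int × Int × Int)) : Decidable (Spec_sierpinski_positions depth N out) := by unfold Spec_sierpinski_positions; infer_instance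

-- ===== CLAIM (what is proved, stated in full; the proofs are below) =====
def Claim_equal_sierpinski_positions : Prop := ∀ (depth : Option Int) (N : Option Int), Dom_sierpinski_positions depth N → Pre_sierpinski_positions depth N → Spec_sierpinski_positions depth N (sierpinski_positions depth N)

-- ===== LEMMAS AND PROOFS =====

-- the two copies of the N-to-depth guard agree
theorem depthLoop_eq (n : Int) (d : Nat) : aDepthLoop n d = bDepthLoop n d := by
  rw [aDepthLoop, bDepthLoop]
  split
  · exact depthLoop_eq n (d + 1)
  · rfl
termination_by (n - 3 ^ d).toNat
decreasing_by
  have h1 : (0:Int) < 3 ^ d := pow_pos (by norm_num) d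
  omega

-- one round of A's loop, as a function of the round counter t
def step (t : Nat) (pos : List (Int × Int × Int)) : List (Int × Int × Int) :=
  pos ++ pos.map (fun p => (p.1 + 3 ^ t, p.2.1 + 2 ^ t, p.2.2 + 2 ^ (t + 1) - 1))
      ++ pos.map (fun p => (p.1 + 2 * 3 ^ t, p.2.1 + 2 ^ (t + 1), p.2.2))

-- n rounds starting at round counter t
def iter (n : Nat) (t : Nat) (pos : List (Int × Int × Int)) : List (Int × Int × Int) :=
  match n with
  | 0 => pos
  | n + 1 => iter n (t + 1) (step t pos)

theorem aLoop_eq_iter (d : Int) (t : Nat) (pos : List (Int × Int × Int)) :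
    aLoop d t pos = iter (d - t).toNat t pos := by
  rw [aLoop]
  split
  · rename_i h
    have hk : (d - (t:Int)).toNat = (d - (t+1:Nat)).toNat + 1 := by push_cast; omega
    rw [hk, iter, aLoop_eq_iter d (t + 1)]
    rfl
  · have hk : (d - (t:Int)).toNat = 0 := by omega
    rw [hk, iter]
termination_by (d - t).toNat
decreasing_by omega

-- peel a round off the TOP instead of the bottom
theorem iter_succ_top (n t : Nat) (pos : List (Int × Int × Int)) :
    iter (n + 1) t pos = step (t + n) (iter n t pos) := by
  induction n generalizing t pos with
  | zero => simp [iter]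
  | succ m ih =>
      rw [iter, ih, iter]
      congr 1
      omega

-- turn PySem floor-div/mod by 3 into Euclidean ones (divisor positive), for omega
theorem fd3 (m : Int) : PySem.Int.floordiv m 3 = m / 3 :=
  PySem.Int.floordiv_eq_ediv_of_pos (by norm_num)
theorem md3 (m : Int) : PySem.Int.mod m 3 = m % 3 :=
  PySem.Int.mod_eq_emod_of_pos (by norm_num)

theorem bDigitLoop_zero (t : Nat) (x y : Int) : bDigitLoop 0 t x y = (x, y) := by
  rw [bDigitLoop]; norm_num

-- adding the digit 1 at base-3 position j (counted from counter t) shifts the result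
theorem dig1 (j : Nat) : ∀ (m x y : Int) (t : Nat), 0 ≤ m → m < 3 ^ j →
    bDigitLoop (m + 3 ^ j) t x y =
      ((bDigitLoop m t x y).1 + 2 ^ (t + j), (bDigitLoop m t x y).2 + 2 ^ (t + j + 1) - 1) := by
  induction j with
  | zero =>
      intro m x y t h0 h1
      have hm : m = 0 := by omega
      subst hm
      rw [bDigitLoop_zero, show (0:Int) + 3 ^ 0 = 1 from by norm_num, bDigitLoop]
      norm_num [md3, fd3, bDigitLoop_zero]
  | succ j ih =>
      intro m x y t h0 h1
      have hs : (0:Int) < 3 ^ j := pow_pos (by norm_num) j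
      have hrw : (3:Int) ^ (j + 1) = 3 * 3 ^ j := by ring
      by_cases hm : 0 < m
      · have hpos : 0 < m + 3 ^ (j + 1) := by rw [hrw]; omega
        have hmod : PySem.Int.mod (m + 3 ^ (j + 1)) 3 = PySem.Int.mod m 3 := by
          rw [md3, md3, hrw]; omega
        have hdiv : PySem.Int.floordiv (m + 3 ^ (j + 1)) 3 = PySem.Int.floordiv m 3 + 3 ^ j := by
          rw [fd3, fd3, hrw]; omega
        have hq0 : 0 ≤ PySem.Int.floordiv m 3 := by rw [fd3]; omega
        have hq1 : PySem.Int.floordiv m 3 < 3 ^ j := by rw [fd3]; rw [hrw] at h1; omega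
        conv_lhs => rw [bDigitLoop]
        conv_rhs => rw [bDigitLoop]
        rw [if_pos hpos, if_pos hm, hmod, hdiv]
        have e : t + 1 + j = t + (j + 1) := by omega
        split
        · rw [ih _ _ _ _ hq0 hq1, e]
        · split
          · rw [ih _ _ _ _ hq0 hq1, e]
          · rw [ih _ _ _ _ hq0 hq1, e]
      · have hm0 : m = 0 := by omega
        subst hm0
        rw [show (0:Int) + 3 ^ (j + 1) = 3 ^ (j + 1) from by ring]
        conv_lhs => rw [bDigitLoop]
        have c1 : ¬ (PySem.Int.mod ((3:Int) ^ (j + 1)) 3 = 1) := by rw [md3, hrw]; omega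
        have c2 : ¬ (PySem.Int.mod ((3:Int) ^ (j + 1)) 3 = 2) := by rw [md3, hrw]; omega
        have cd : PySem.Int.floordiv ((3:Int) ^ (j + 1)) 3 = 0 + 3 ^ j := by rw [fd3, hrw]; omega
        rw [if_pos (by positivity), if_neg c1, if_neg c2, cd,
          ih 0 x y (t + 1) le_rfl hs, bDigitLoop_zero, bDigitLoop_zero,
          show t + 1 + j = t + (j + 1) from by omega]

-- adding the digit 2 at base-3 position j shifts the result the other way
theorem dig2 (j : Nat) : ∀ (m x y : Int) (t : Nat), 0 ≤ m → m < 3 ^ j →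
    bDigitLoop (m + 2 * 3 ^ j) t x y =
      ((bDigitLoop m t x y).1 + 2 ^ (t + j + 1), (bDigitLoop m t x y).2) := by
  induction j with
  | zero =>
      intro m x y t h0 h1
      have hm : m = 0 := by omega
      subst hm
      rw [bDigitLoop_zero, show (0:Int) + 2 * 3 ^ 0 = 2 from by norm_num, bDigitLoop]
      norm_num [md3, fd3, bDigitLoop_zero]
  | succ j ih =>
      intro m x y t h0 h1
      have hs : (0:Int) < 3 ^ j := pow_pos (by norm_num) j
      have hrw : (3:Int) ^ (j + 1) = 3 * 3 ^ j := by ring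
      by_cases hm : 0 < m
      · have hpos : 0 < m + 2 * 3 ^ (j + 1) := by rw [hrw]; omega
        have hmod : PySem.Int.mod (m + 2 * 3 ^ (j + 1)) 3 = PySem.Int.mod m 3 := by
          rw [md3, md3, hrw]; omega
        have hdiv : PySem.Int.floordiv (m + 2 * 3 ^ (j + 1)) 3 = PySem.Int.floordiv m 3 + 2 * 3 ^ j := by
          rw [fd3, fd3, hrw]; omega
        have hq0 : 0 ≤ PySem.Int.floordiv m 3 := by rw [fd3]; omega
        have hq1 : PySem.Int.floordiv m 3 < 3 ^ j := by rw [fd3]; rw [hrw] at h1; omega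
        conv_lhs => rw [bDigitLoop]
        conv_rhs => rw [bDigitLoop]
        rw [if_pos hpos, if_pos hm, hmod, hdiv]
        have e : t + 1 + j + 1 = t + (j + 1) + 1 := by omega
        split
        · rw [ih _ _ _ _ hq0 hq1, e]
        · split
          · rw [ih _ _ _ _ hq0 hq1, e]
          · rw [ih _ _ _ _ hq0 hq1, e]
      · have hm0 : m = 0 := by omega
        subst hm0
        rw [show (0:Int) + 2 * 3 ^ (j + 1) = 2 * 3 ^ (j + 1) from by ring]
        conv_lhs => rw [bDigitLoop]
        have c1 : ¬ (PySem.Int.mod (2 * (3:Int) ^ (j + 1)) 3 = 1) := by rw [md3, hrw]; omega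
        have c2 : ¬ (PySem.Int.mod (2 * (3:Int) ^ (j + 1)) 3 = 2) := by rw [md3, hrw]; omega
        have cd : PySem.Int.floordiv (2 * (3:Int) ^ (j + 1)) 3 = 0 + 2 * 3 ^ j := by rw [fd3, hrw]; omega
        rw [if_pos (by positivity), if_neg c1, if_neg c2, cd,
          ih 0 x y (t + 1) le_rfl hs, bDigitLoop_zero, bDigitLoop_zero,
          show t + 1 + j + 1 = t + (j + 1) + 1 from by omega]

-- the closed form respects the 'second copy' shift of round k+1
theorem bNode_add1 (k : Nat) (i : Int) (h0 : 0 ≤ i) (h1 : i < 3 ^ (k + 1)) :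
    bNode (i + 3 ^ (k + 1)) =
      ((bNode i).1 + 3 ^ (k + 1), (bNode i).2.1 + 2 ^ (k + 1), (bNode i).2.2 + 2 ^ (k + 1 + 1) - 1) := by
  unfold bNode
  have hrw : (3:Int) ^ (k + 1) = 3 * 3 ^ k := by ring
  have hmod : PySem.Int.mod (i + 3 ^ (k + 1)) 3 = PySem.Int.mod i 3 := by
    rw [md3, md3, hrw]; omega
  have hdiv : PySem.Int.floordiv (i + 3 ^ (k + 1)) 3 = PySem.Int.floordiv i 3 + 3 ^ k := by
    rw [fd3, fd3, hrw]; omega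
  have hq0 : 0 ≤ PySem.Int.floordiv i 3 := by rw [fd3]; omega
  have hq1 : PySem.Int.floordiv i 3 < 3 ^ k := by rw [fd3]; rw [hrw] at h1; omega
  simp only [hmod, hdiv]
  rw [dig1 k _ _ _ 1 hq0 hq1, show 1 + k = k + 1 from Nat.add_comm 1 k]

-- the closed form respects the 'third copy' shift of round k+1
theorem bNode_add2 (k : Nat) (i : Int) (h0 : 0 ≤ i) (h1 : i < 3 ^ (k + 1)) :
    bNode (i + 2 * 3 ^ (k + 1)) =
      ((bNode i).1 + 2 * 3 ^ (k + 1), (bNode i).2.1 + 2 ^ (k + 1 + 1), (bNode i).2.2) := by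
  unfold bNode
  have hrw : (3:Int) ^ (k + 1) = 3 * 3 ^ k := by ring
  have hmod : PySem.Int.mod (i + 2 * 3 ^ (k + 1)) 3 = PySem.Int.mod i 3 := by
    rw [md3, md3, hrw]; omega
  have hdiv : PySem.Int.floordiv (i + 2 * 3 ^ (k + 1)) 3 = PySem.Int.floordiv i 3 + 2 * 3 ^ k := by
    rw [fd3, fd3, hrw]; omega
  have hq0 : 0 ≤ PySem.Int.floordiv i 3 := by rw [fd3]; omega
  have hq1 : PySem.Int.floordiv i 3 < 3 ^ k := by rw [fd3]; rw [hrw] at h1; omega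
  simp only [hmod, hdiv]
  rw [dig2 k _ _ _ 1 hq0 hq1, show 1 + k = k + 1 from Nat.add_comm 1 k]

-- A's k rounds over the base triangle produce exactly the closed form on 0..3^(k+1)-1
theorem iter_eq_map (k : Nat) :
    iter k 1 [(0, 0, 0), (1, 1, 2), (2, 2, 0)] =
      (List.range (3 ^ (k + 1))).map (fun i : Nat => bNode (i : Int)) := by
  induction k with
  | zero =>
      have e0 : bNode 0 = (0, 0, 0) := by unfold bNode; norm_num [md3, fd3, bDigitLoop_zero]
      have e1 : bNode 1 = (1, 1, 2) := by unfold bNode; norm_num [md3, fd3, bDigitLoop_zero]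
      have e2 : bNode 2 = (2, 2, 0) := by unfold bNode; norm_num [md3, fd3, bDigitLoop_zero]
      simp [iter, List.range_succ, e0, e1, e2]
  | succ k ih =>
      rw [iter_succ_top, ih, show 1 + k = k + 1 from by omega]
      rw [show 3 ^ (k + 1 + 1) = 3 ^ (k + 1) + (3 ^ (k + 1) + 3 ^ (k + 1)) from by ring]
      rw [List.range_add, List.range_add]
      simp only [List.map_append, List.map_map]
      unfold step
      simp only [List.map_map, List.append_assoc]
      congr 1
      congr 1
      · apply List.map_congr_left
        intro i hi
        have hi' : i < 3 ^ (k + 1) := List.mem_range.mp hi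
        have hc : ((3 ^ (k + 1) + i : Nat) : Int) = (i : Int) + (3:Int) ^ (k + 1) := by
          push_cast; ring
        simp only [Function.comp_apply, hc]
        rw [bNode_add1 k (i : Int) (by positivity) (by exact_mod_cast hi')]
      · apply List.map_congr_left
        intro i hi
        have hi' : i < 3 ^ (k + 1) := List.mem_range.mp hi
        have hc : ((3 ^ (k + 1) + (3 ^ (k + 1) + i) : Nat) : Int) = (i : Int) + 2 * (3:Int) ^ (k + 1) := by
          push_cast; ring
        simp only [Function.comp_apply, hc]
        rw [bNode_add2 k (i : Int) (by positivity) (by exact_mod_cast hi')]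

-- A's whole loop equals B's map over range(size)
theorem core (d : Int) :
    aLoop d 1 [(0, 0, 0), (1, 1, 2), (2, 2, 0)] =
      (PySem.List.pyRange 0 (if d ≤ 1 then 3 else 3 ^ d.toNat) 1).map bNode := by
  rw [aLoop_eq_iter, iter_eq_map, PySem.List.pyRange_one, List.map_map]
  simp only [Nat.cast_one]
  by_cases hd : d ≤ 1
  · rw [if_pos hd, show (d - 1).toNat = 0 from by omega,
      show ((3:Int) - 0).toNat = 3 from by decide, show (3:Nat) ^ (0 + 1) = 3 from by norm_num]
    apply List.map_congr_left
    intro i hi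
    simp
  · rw [if_neg hd, show (d - 1).toNat + 1 = d.toNat from by omega, sub_zero,
      show ((3:Int) ^ d.toNat).toNat = 3 ^ d.toNat from by
        rw [show (3:Int) ^ d.toNat = ((3 ^ d.toNat : Nat) : Int) from by push_cast; ring]
        exact Int.toNat_natCast _]
    apply List.map_congr_left
    intro i hi
    simp

-- ===== VERDICT (by name: the statement is the Claim_ definition above) =====
theorem sierpinski_positions_spec : Claim_equal_sierpinski_positions := by
  intro depth N _ _
  unfold Spec_sierpinski_positions sierpinski_positions sierpinski_positions_alt
  cases N with
  | some n => simp only [depthLoop_eq, core]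
  | none => simp only [core]
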